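-- pv_equiv track=rewrite | github.com/jacksonwildemurphy/pythonistas-contra-terroristas | infoextract.py | get_attack_or_bombing_weapon
-- ===== SOURCE A (Python) =====
-- import operator
--
-- def get_attack_or_bombing_weapon(story):
-- 	weapon_strings = ['BOMB', 'BOMBS', 'ROCKET', 'ROCKETS', 'MACHINE GUN', 'MACHINEGUNS',
-- 	'MACHINEGUN', 'SUBMACHINEGUN', 'DYNAMITE', 'GRENADE', 'GRENADES', 'AK 47S', 'BULLET',
-- 	'BULLETS',  'MORTAR']
-- 	weapon_count = {w: 0 for w in weapon_strings}
-- 	story_list = story.split()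
-- 	for word in story_list:
-- 		if word in weapon_strings:
-- 			weapon_count[word] += 1
-- 	sorted_weapons = sorted(weapon_count.items(), key=operator.itemgetter(1))
-- 	if sorted_weapons[-1][1] != 0:
-- 		return sorted_weapons[-1][0]
-- 	else:
-- 		return '-'
-- ===== SOURCE B (Python) =====
-- def get_attack_or_bombing_weapon(story):
--     weapons = ['BOMB', 'BOMBS', 'ROCKET', 'ROCKETS', 'MACHINE GUN', 'MACHINEGUNS',
--                'MACHINEGUN', 'SUBMACHINEGUN', 'DYNAMITE', 'GRENADE', 'GRENADES',
--                'AK 47S', 'BULLET', 'BULLETS', 'MORTAR']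
--     wset = set(weapons)
--     counts = {}
--     for word in story.split():
--         if word in wset:
--             counts[word] = counts.get(word, 0) + 1
--     # direct last-wins argmax over the keyword list (no sort)
--     best_word, best_count = '-', 0
--     for w in weapons:
--         c = counts.get(w, 0)
--         if c >= best_count:
--             best_word, best_count = w, c
--     return best_word if best_count != 0 else '-'
-- ===== Notes on version B (the rewrite author's own statement) =====
-- stated objective: alternative
-- what changed: B drops A's stable-sort of the count table and instead tallies only matching words into a dict and does a single last-wins argmax scan over the keyword list (update on count >= best), returning the dash placeholder when the best count is zero.
import Mathlib
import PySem

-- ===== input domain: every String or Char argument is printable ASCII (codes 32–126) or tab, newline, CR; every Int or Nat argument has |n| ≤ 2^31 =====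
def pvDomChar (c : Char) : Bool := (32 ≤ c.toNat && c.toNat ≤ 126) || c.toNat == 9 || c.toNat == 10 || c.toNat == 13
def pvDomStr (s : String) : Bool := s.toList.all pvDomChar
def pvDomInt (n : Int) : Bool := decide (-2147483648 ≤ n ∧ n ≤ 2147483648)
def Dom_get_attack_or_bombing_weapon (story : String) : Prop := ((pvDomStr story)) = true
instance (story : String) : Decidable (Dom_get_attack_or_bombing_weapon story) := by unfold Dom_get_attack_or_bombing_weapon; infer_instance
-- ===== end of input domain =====

-- B replaces A's "stable-sort the count table, take the last entry" by a single last-wins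
-- argmax scan over the keyword list (objective: alternative/simpler tail; no sort).

-- ===== PORT A =====
def get_attack_or_bombing_weapon (story : String) : String :=
  let weapon_strings : List String := ["BOMB", "BOMBS", "ROCKET", "ROCKETS", "MACHINE GUN",
    "MACHINEGUNS", "MACHINEGUN", "SUBMACHINEGUN", "DYNAMITE", "GRENADE", "GRENADES",
    "AK 47S", "BULLET", "BULLETS", "MORTAR"]
  let weapon_count : PySem.Dict String Int :=
    weapon_strings.foldl (fun d w => d.insert w 0) PySem.Dict.empty
  let story_list := PySem.Str.split₀ story
  let weapon_count := story_list.foldl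
    (fun d word => if word ∈ weapon_strings then d.modify word 0 (fun x => x + 1) else d)
    weapon_count
  let sorted_weapons := PySem.List.sorted weapon_count.items (fun p => p.2)
  -- sorted_weapons[-1]: the dict always has 15 entries, so Python's [-1] never raises;
  -- the `none` branch is unreachable
  match PySem.List.pyGet? sorted_weapons (-1) with
  | some p => if p.2 ≠ 0 then p.1 else "-"
  | none => "-"

-- ===== PORT B =====
def get_attack_or_bombing_weapon_alt (story : String) : String :=
  let weapons : List String := ["BOMB", "BOMBS", "ROCKET", "ROCKETS", "MACHINE GUN",
    "MACHINEGUNS", "MACHINEGUN", "SUBMACHINEGUN", "DYNAMITE", "GRENADE", "GRENADES",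
    "AK 47S", "BULLET", "BULLETS", "MORTAR"]
  let wset := PySem.Set.ofList weapons
  let counts : PySem.Dict String Int := (PySem.Str.split₀ story).foldl
    (fun d word => if word ∈ wset then d.insert word (d.getD word 0 + 1) else d)
    PySem.Dict.empty
  let best := weapons.foldl
    (fun (b : String × Int) w =>
      let c := counts.getD w 0
      if c ≥ b.2 then (w, c) else b)
    ("-", 0)
  if best.2 ≠ 0 then best.1 else "-"

-- ===== PRECONDITION & SPEC =====
def Spec_get_attack_or_bombing_weapon (story : String) (out : String) : Prop := out = get_attack_or_bombing_weapon_alt story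
instance (story : String) (out : String) : Decidable (Spec_get_attack_or_bombing_weapon story out) := by unfold Spec_get_attack_or_bombing_weapon; infer_instance

-- ===== CLAIM (what is proved, stated in full; the proofs are below) =====
def Claim_equal_get_attack_or_bombing_weapon : Prop := ∀ (story : String), Dom_get_attack_or_bombing_weapon story → Spec_get_attack_or_bombing_weapon story (get_attack_or_bombing_weapon story)

-- ===== LEMMAS AND PROOFS =====

theorem pv_insertBy_ne_nil (x : String × Int) (acc : List (String × Int)) :
    PySem.List.insertBy (fun a b => decide (a.2 < b.2)) x acc ≠ [] := by
  cases acc with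
  | nil => simp [PySem.List.insertBy]
  | cons y ys =>
    simp only [PySem.List.insertBy]
    split <;> simp

theorem pv_insertBy_getLast (x : String × Int) :
    ∀ (acc : List (String × Int)) (b : String × Int),
    acc.getLast? = some b → x.2 < b.2 →
    (PySem.List.insertBy (fun a b => decide (a.2 < b.2)) x acc).getLast? = some b := by
  intro acc
  induction acc with
  | nil => intro b h; simp at h
  | cons y ys ih =>
    intro b h hx
    simp only [PySem.List.insertBy]
    split
    · rw [List.getLast?_cons_cons]; exact h
    · rename_i hby
      cases ys with
      | nil =>
        simp at h
        subst h
        simp at hby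
        omega
      | cons z zs =>
        rw [List.getLast?_cons_cons] at h
        have h2 := ih b h hx
        rcases hne : PySem.List.insertBy (fun a b => decide (a.2 < b.2)) x (z :: zs) with _ | ⟨c, cs⟩
        · exact absurd hne (pv_insertBy_ne_nil x (z :: zs))
        · rw [hne] at h2
          rw [hne, List.getLast?_cons_cons]
          exact h2

theorem pv_sort_scan :
    ∀ (l acc : List (String × Int)) (b : String × Int),
    acc.getLast? = some b → (∀ p ∈ acc, p.2 ≤ b.2) →
    (l.foldl (fun a x => PySem.List.insertBy (fun a b => decide (a.2 < b.2)) x a) acc).getLast?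
      = some (l.foldl (fun b x => if b.2 ≤ x.2 then x else b) b) ∧
    (∀ p ∈ l.foldl (fun a x => PySem.List.insertBy (fun a b => decide (a.2 < b.2)) x a) acc,
      p.2 ≤ (l.foldl (fun b x => if b.2 ≤ x.2 then x else b) b).2) := by
  intro l
  induction l with
  | nil => intro acc b h hmax; exact ⟨h, hmax⟩
  | cons x l ih =>
    intro acc b h hmax
    simp only [List.foldl_cons]
    by_cases hx : b.2 ≤ x.2
    · have hall : ∀ y ∈ acc, (fun a b : String × Int => decide (a.2 < b.2)) x y = false := by
        intro y hy
        simp only [decide_eq_false_iff_not, not_lt]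
        exact le_trans (hmax y hy) hx
      rw [PySem.List.insertBy_of_forall_not_before _ _ _ hall]
      rw [if_pos hx]
      exact ih (acc ++ [x]) x (by simp) (by
        intro p hp
        rcases List.mem_append.1 hp with hp | hp
        · exact le_trans (hmax p hp) hx
        · simp at hp; simp [hp])
    · push Not at hx
      rw [if_neg (by omega)]
      exact ih _ b (pv_insertBy_getLast x acc b h hx) (by
        intro p hp
        rcases (PySem.List.mem_insertBy _ _ _ _).1 hp with rfl | hp
        · omega
        · exact hmax p hp)

theorem pv_pyGet_neg_one (l : List (String × Int)) (hl : l ≠ []) :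
    PySem.List.pyGet? l (-1) = l.getLast? := by
  have hlen : 1 ≤ l.length := List.length_pos_iff.2 hl
  simp only [PySem.List.pyGet?, PySem.List.pyIdx?]
  rw [if_neg (by omega), if_pos (by omega)]
  simp only [Option.bind_some, List.getLast?_eq_getElem?]
  rfl

theorem pv_set_update_of_subset :
    ∀ (xs s : List String), (∀ x ∈ xs, x ∈ s) → PySem.Set.update s xs = s := by
  intro xs
  induction xs with
  | nil => intro s _; rfl
  | cons x xs ih =>
    intro s h
    simp only [PySem.Set.update, List.foldl_cons]
    have : PySem.Set.add s x = s := by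
      simp [PySem.Set.add, PySem.Set.contains, h x (by simp)]
    rw [this]
    exact ih s (fun y hy => h y (by simp [hy]))

theorem pv_A_items (ws words : List String) (hnd : ws.Nodup) :
    (words.foldl (fun d word => if word ∈ ws then d.modify word (0:Int) (fun x => x + 1) else d)
       (ws.foldl (fun d w => d.insert w (0:Int)) PySem.Dict.empty)).items
    = ws.map (fun w => (w, (words.count w : Int))) := by
  have hitems0 : (ws.foldl (fun d w => d.insert w (0 : Int)) PySem.Dict.empty).items
      = ws.map (fun w => (w, (0 : Int))) := by
    have := PySem.Dict.items_foldl_insert_fresh ws (fun a => a) (fun _ => (0 : Int))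
      PySem.Dict.empty (by simp) (by simpa)
    simpa using this
  have hkeys0 : (ws.foldl (fun d w => d.insert w (0 : Int)) PySem.Dict.empty).keys = ws := by
    simp [PySem.Dict.keys, hitems0, Function.comp_def]
  have hfold : words.foldl (fun d word => if word ∈ ws then d.modify word (0:Int) (fun x => x + 1) else d)
        (ws.foldl (fun d w => d.insert w (0:Int)) PySem.Dict.empty)
      = (words.filter (fun w => decide (w ∈ ws))).foldl (fun d w => d.modify w (0:Int) (fun x => x + 1))
        (ws.foldl (fun d w => d.insert w (0:Int)) PySem.Dict.empty) := by
    rw [List.foldl_filter]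
    simp
  rw [hfold]
  have hkeys1 : ((words.filter (fun w => decide (w ∈ ws))).foldl
      (fun d w => d.modify w (0:Int) (fun x => x + 1))
      (ws.foldl (fun d w => d.insert w (0:Int)) PySem.Dict.empty)).keys = ws := by
    rw [PySem.Dict.keys_foldl_modify _ _ (fun _ _ => (fun x => x + 1)), hkeys0]
    exact pv_set_update_of_subset _ _ (fun x hx => by simpa using (List.mem_filter.1 hx).2)
  have hnd1 : ((words.filter (fun w => decide (w ∈ ws))).foldl
      (fun d w => d.modify w (0:Int) (fun x => x + 1))
      (ws.foldl (fun d w => d.insert w (0:Int)) PySem.Dict.empty)).keys.Nodup := by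
    rw [hkeys1]; exact hnd
  rw [PySem.Dict.items_eq_map_keys _ hnd1 0, hkeys1]
  apply List.map_congr_left
  intro w hw
  have hg : ((words.filter (fun w => decide (w ∈ ws))).foldl
      (fun d w => d.modify w (0:Int) (fun x => x + 1))
      (ws.foldl (fun d w => d.insert w (0:Int)) PySem.Dict.empty)).getD w 0
      = (words.count w : Int) := by
    rw [PySem.Dict.getD_foldl_modify_add_one]
    have h0 : (ws.foldl (fun d w => d.insert w (0 : Int)) PySem.Dict.empty).getD w 0 = 0 := by
      apply PySem.Dict.getD_of_mem_items _ _ (by rw [hkeys0]; exact hnd)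
      rw [hitems0]
      exact List.mem_map.2 ⟨w, hw, rfl⟩
    rw [h0, List.count_filter (by simpa using hw)]
    ring
  rw [hg]

theorem pv_B_getD (ws words : List String) (w : String) (hw : w ∈ ws) :
    (words.foldl (fun d word => if word ∈ PySem.Set.ofList ws then d.insert word (d.getD word (0:Int) + 1) else d)
        PySem.Dict.empty).getD w 0 = (words.count w : Int) := by
  have hfold : words.foldl (fun d word => if word ∈ PySem.Set.ofList ws then d.insert word (d.getD word (0:Int) + 1) else d)
        PySem.Dict.empty
      = (words.filter (fun x => decide (x ∈ PySem.Set.ofList ws))).foldl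
          (fun d word => d.insert word (d.getD word (0:Int) + 1)) PySem.Dict.empty := by
    rw [List.foldl_filter]
    simp
  rw [hfold, PySem.Dict.getD_foldl_insert_add_one]
  rw [List.count_filter (by simp [PySem.Set.mem_ofList, hw])]
  simp

theorem pv_A_val (words : List String) (w0 : String) (rest : List String)
    (hnd : (w0 :: rest).Nodup) :
    (match PySem.List.pyGet? (PySem.List.sorted
        (words.foldl (fun d word => if word ∈ (w0 :: rest) then d.modify word (0:Int) (fun x => x + 1) else d)
          ((w0 :: rest).foldl (fun d w => d.insert w (0:Int)) PySem.Dict.empty)).items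
        (fun p => p.2)) (-1) with
      | some p => if p.2 ≠ 0 then p.1 else "-"
      | none => "-")
    = (if ((rest.map (fun w => (w, (words.count w : Int)))).foldl
          (fun (b : String × Int) x => if b.2 ≤ x.2 then x else b)
          (w0, (words.count w0 : Int))).2 ≠ 0 then
        ((rest.map (fun w => (w, (words.count w : Int)))).foldl
          (fun (b : String × Int) x => if b.2 ≤ x.2 then x else b)
          (w0, (words.count w0 : Int))).1
      else "-") := by
  rw [pv_A_items _ _ hnd]
  rw [PySem.List.sorted_eq_foldl_insertBy]
  rw [List.map_cons, List.foldl_cons]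
  have hstep1 : PySem.List.insertBy (fun a b => decide (a.2 < b.2)) (w0, (words.count w0 : Int)) [] = [(w0, (words.count w0 : Int))] := by
    simp [PySem.List.insertBy]
  rw [hstep1]
  have hA := (pv_sort_scan (rest.map (fun w => (w, (words.count w : Int))))
      [(w0, (words.count w0 : Int))] (w0, (words.count w0 : Int)) (by simp) (by simp)).1
  have hne : (rest.map (fun w => (w, (words.count w : Int)))).foldl
      (fun a x => PySem.List.insertBy (fun a b => decide (a.2 < b.2)) x a)
      [(w0, (words.count w0 : Int))] ≠ [] := by
    intro h
    rw [h] at hA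
    simp at hA
  rw [pv_pyGet_neg_one _ hne, hA]

theorem pv_scan_eq (g cnt : String → Int) : ∀ (l : List String) (init : String × Int),
    (∀ w ∈ l, g w = cnt w) →
    l.foldl (fun (b : String × Int) w => if g w ≥ b.2 then (w, g w) else b) init
    = (l.map (fun w => (w, cnt w))).foldl (fun (b : String × Int) x => if b.2 ≤ x.2 then x else b) init := by
  intro l
  induction l with
  | nil => intro init _; rfl
  | cons x l ih =>
    intro init h
    simp only [List.map_cons, List.foldl_cons]
    rw [h x List.mem_cons_self]
    simp only [ge_iff_le]
    exact ih _ (fun w hw => h w (List.mem_cons_of_mem _ hw))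

theorem pv_B_val (words : List String) (w0 : String) (rest : List String) :
    (let counts := words.foldl
          (fun d word => if word ∈ PySem.Set.ofList (w0 :: rest) then d.insert word (d.getD word (0:Int) + 1) else d)
          PySem.Dict.empty
     let best := (w0 :: rest).foldl
          (fun (b : String × Int) w => let c := counts.getD w 0; if c ≥ b.2 then (w, c) else b)
          ("-", (0:Int))
     if best.2 ≠ 0 then best.1 else "-")
    = (if ((rest.map (fun w => (w, (words.count w : Int)))).foldl
          (fun (b : String × Int) x => if b.2 ≤ x.2 then x else b)
          (w0, (words.count w0 : Int))).2 ≠ 0 then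
        ((rest.map (fun w => (w, (words.count w : Int)))).foldl
          (fun (b : String × Int) x => if b.2 ≤ x.2 then x else b)
          (w0, (words.count w0 : Int))).1
      else "-") := by
  have hscan := pv_scan_eq
    (fun w => (words.foldl
        (fun d word => if word ∈ PySem.Set.ofList (w0 :: rest) then d.insert word (d.getD word (0:Int) + 1) else d)
        PySem.Dict.empty).getD w 0)
    (fun w => (words.count w : Int))
    (w0 :: rest) ("-", (0:Int))
    (fun w hw => pv_B_getD (w0 :: rest) words w hw)
  simp only [] at hscan ⊢
  rw [hscan]
  rw [List.map_cons, List.foldl_cons]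
  rw [if_pos (show (("-", (0:Int)) : String × Int).2 ≤ ((w0, (words.count w0 : Int)) : String × Int).2 from by simp)]

theorem pv_master (words : List String) (w0 : String) (rest : List String)
    (hnd : (w0 :: rest).Nodup) :
    (match PySem.List.pyGet? (PySem.List.sorted
        (words.foldl (fun d word => if word ∈ (w0 :: rest) then d.modify word (0:Int) (fun x => x + 1) else d)
          ((w0 :: rest).foldl (fun d w => d.insert w (0:Int)) PySem.Dict.empty)).items
        (fun p => p.2)) (-1) with
      | some p => if p.2 ≠ 0 then p.1 else "-"
      | none => "-")
    = (let counts := words.foldl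
          (fun d word => if word ∈ PySem.Set.ofList (w0 :: rest) then d.insert word (d.getD word (0:Int) + 1) else d)
          PySem.Dict.empty
       let best := (w0 :: rest).foldl
          (fun (b : String × Int) w => let c := counts.getD w 0; if c ≥ b.2 then (w, c) else b)
          ("-", (0:Int))
       if best.2 ≠ 0 then best.1 else "-") :=
  (pv_A_val words w0 rest hnd).trans (pv_B_val words w0 rest).symm

-- ===== VERDICT (by name: the statement is the Claim_ definition above) =====
theorem get_attack_or_bombing_weapon_spec : Claim_equal_get_attack_or_bombing_weapon := by
  intro story _
  unfold Spec_get_attack_or_bombing_weapon get_attack_or_bombing_weapon get_attack_or_bombing_weapon_alt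
  exact pv_master (PySem.Str.split₀ story) "BOMB"
    ["BOMBS", "ROCKET", "ROCKETS", "MACHINE GUN", "MACHINEGUNS", "MACHINEGUN",
     "SUBMACHINEGUN", "DYNAMITE", "GRENADE", "GRENADES", "AK 47S", "BULLET",
     "BULLETS", "MORTAR"] (by decide)
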